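-- pv_equiv track=rewrite | github.com/aonurakman/OpenURB | tools/run_todo.py | _get_flag_value
-- ===== SOURCE A (Python) =====
-- from typing import Optional
--
-- def _get_flag_value(argv: list[str], flag: str) -> Optional[str]:
--     if flag in argv:
--         idx = argv.index(flag)
--         if idx + 1 >= len(argv):
--             return None
--         return argv[idx + 1]
--     prefix = f"{flag}="
--     for arg in argv:
--         if arg.startswith(prefix):
--             return arg.split("=", 1)[1]
--     return None
-- ===== SOURCE B (Python) =====
-- from typing import Optional
--
-- def _get_flag_value(argv: list[str], flag: str) -> Optional[str]:
--     prefix = f"{flag}="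
--     pending = None
--     for i, arg in enumerate(argv):
--         if arg == flag:
--             return argv[i + 1] if i + 1 < len(argv) else None
--         if pending is None and arg.startswith(prefix):
--             pending = arg.split("=", 1)[1]
--     return pending
-- ===== Notes on version B (the rewrite author's own statement) =====
-- stated objective: simpler
-- what changed: Replaces A's membership test + .index + separate prefix loop (up to three scans) with one enumerate pass that returns immediately on an exact flag match and records the first 'flag=' prefix value for after the loop.
import Mathlib
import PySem

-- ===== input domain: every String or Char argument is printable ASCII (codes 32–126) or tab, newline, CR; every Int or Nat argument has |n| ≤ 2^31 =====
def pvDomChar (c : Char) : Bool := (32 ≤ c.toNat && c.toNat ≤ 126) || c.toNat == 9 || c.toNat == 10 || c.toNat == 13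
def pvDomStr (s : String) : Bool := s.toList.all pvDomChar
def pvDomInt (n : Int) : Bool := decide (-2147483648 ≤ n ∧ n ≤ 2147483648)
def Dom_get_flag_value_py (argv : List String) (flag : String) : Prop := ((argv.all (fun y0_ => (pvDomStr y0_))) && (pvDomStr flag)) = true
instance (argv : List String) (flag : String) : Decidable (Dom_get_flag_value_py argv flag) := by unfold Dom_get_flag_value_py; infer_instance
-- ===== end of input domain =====

-- B merges A's membership test, .index and separate prefix loop into one enumerate pass (simpler decomposition, same big-O).

-- shared port of the expression `arg.split("=", 1)[1]` (both sources contain it verbatim);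
-- both call sites guard it with startswith(prefix) so the "=" exists and index 1 is in range
def pvSplitTail (arg : String) : String :=
  PySem.List.pyGetD ((PySem.Str.splitMax? arg "=" 1).getD []) 1 ""

-- ===== PORT A =====
-- the `for arg in argv` prefix loop of A
def aPrefixScan (pref : String) : List String → Option String
  | [] => none
  | arg :: rest =>
    if PySem.Str.startswith arg pref then some (pvSplitTail arg)
    else aPrefixScan pref rest

def get_flag_value_py (argv : List String) (flag : String) : Option String :=
  if flag ∈ argv then
    let idx : Nat := (PySem.List.index? argv flag).getD 0
    if (idx : Int) + 1 ≥ (argv.length : Int) then none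
    else PySem.List.pyGet? argv ((idx : Int) + 1)
  else
    aPrefixScan (flag ++ "=") argv

-- ===== PORT B =====
-- the single `for i, arg in enumerate(argv)` loop of B, carrying the index and the pending prefix value
def bScan (argv : List String) (flag pref : String) : List String → Nat → Option String → Option String
  | [], _, pending => pending
  | arg :: rest, i, pending =>
    if arg = flag then
      if ((i : Int) + 1) < (argv.length : Int) then PySem.List.pyGet? argv ((i : Int) + 1)
      else none
    else
      bScan argv flag pref rest (i + 1)
        (if pending.isNone && PySem.Str.startswith arg pref then some (pvSplitTail arg) else pending)

def get_flag_value_py_alt (argv : List String) (flag : String) : Option String :=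
  bScan argv flag (flag ++ "=") argv 0 none

-- ===== PRECONDITION & SPEC =====
def Spec_get_flag_value_py (argv : List String) (flag : String) (out : Option String) : Prop := out = get_flag_value_py_alt argv flag
instance (argv : List String) (flag : String) (out : Option String) : Decidable (Spec_get_flag_value_py argv flag out) := by unfold Spec_get_flag_value_py; infer_instance

-- ===== CLAIM (what is proved, stated in full; the proofs are below) =====
def Claim_equal_get_flag_value_py : Prop := ∀ (argv : List String) (flag : String), Dom_get_flag_value_py argv flag → Spec_get_flag_value_py argv flag (get_flag_value_py argv flag)

-- ===== LEMMAS AND PROOFS =====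

lemma aPrefixScan_append (pref : String) (xs ys : List String) :
    aPrefixScan pref (xs ++ ys) = (aPrefixScan pref xs).or (aPrefixScan pref ys) := by
  induction xs with
  | nil => simp [aPrefixScan]
  | cons a xs ih =>
    simp only [List.cons_append, aPrefixScan, ih]
    split <;> simp

lemma index?_append_cons_self (pre rest : List String) (flag : String) (h : flag ∉ pre) :
    PySem.List.index? (pre ++ flag :: rest) flag = some pre.length := by
  induction pre with
  | nil => rw [List.nil_append, PySem.List.index?_cons_self]; rfl
  | cons a pre ih =>
    have ha : a ≠ flag := by intro hh; exact h (hh ▸ List.mem_cons_self)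
    have h' : flag ∉ pre := fun hm => h (List.mem_cons_of_mem _ hm)
    rw [List.cons_append, PySem.List.index?_cons_of_ne _ ha, ih h']
    rfl

lemma bScan_eq_A (flag : String) :
    ∀ (rest pre : List String), flag ∉ pre →
      bScan (pre ++ rest) flag (flag ++ "=") rest pre.length (aPrefixScan (flag ++ "=") pre)
        = get_flag_value_py (pre ++ rest) flag := by
  intro rest
  induction rest with
  | nil =>
    intro pre hpre
    simp [bScan, get_flag_value_py, hpre]
  | cons arg rest ih =>
    intro pre hpre
    by_cases harg : arg = flag
    · subst harg
      have hmem : arg ∈ pre ++ arg :: rest := by simp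
      have hlen : ((pre ++ arg :: rest).length : Int) = (pre.length : Int) + ((rest.length : Int) + 1) := by
        push_cast [List.length_append, List.length_cons]; ring
      rw [get_flag_value_py, if_pos hmem]
      rw [index?_append_cons_self pre rest arg hpre]
      show (if arg = arg then
              if ((pre.length : Int) + 1) < ((pre ++ arg :: rest).length : Int) then
                PySem.List.pyGet? (pre ++ arg :: rest) ((pre.length : Int) + 1)
              else none
            else _) = _
      rw [if_pos rfl]
      simp only [Option.getD_some]
      by_cases hlt : ((pre.length : Int) + 1) < ((pre ++ arg :: rest).length : Int)
      · rw [if_pos hlt, if_neg (by omega)]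
      · rw [if_neg hlt, if_pos (by omega)]
    · have hpend :
          (if (aPrefixScan (flag ++ "=") pre).isNone && PySem.Str.startswith arg (flag ++ "=") then
            some (pvSplitTail arg) else aPrefixScan (flag ++ "=") pre)
            = aPrefixScan (flag ++ "=") (pre ++ [arg]) := by
        rw [aPrefixScan_append]
        cases hp : aPrefixScan (flag ++ "=") pre <;>
          simp [aPrefixScan]
      have hpre' : flag ∉ pre ++ [arg] := by
        simp [hpre]; exact fun hh => harg hh.symm
      have hEq : (pre ++ [arg]) ++ rest = pre ++ arg :: rest := by simp
      have := ih (pre ++ [arg]) hpre'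
      rw [hEq] at this
      simp only [List.length_append, List.length_singleton] at this
      rw [bScan, if_neg harg, hpend]
      exact this

-- ===== VERDICT (by name: the statement is the Claim_ definition above) =====
theorem get_flag_value_py_spec : Claim_equal_get_flag_value_py := by
  intro argv flag _
  unfold Spec_get_flag_value_py get_flag_value_py_alt
  have := bScan_eq_A flag argv [] (by simp)
  simpa [aPrefixScan] using this.symm
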